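-- pv_equiv track=rewrite | github.com/Surya-Chinnathambi/VAPT_AI | backend/ai_training/enhanced_training.py | _extract_tools_from_steps
-- ===== SOURCE A (Python) =====
-- from typing import Dict, List, Any, Optional
--
-- def _extract_tools_from_steps(steps: List[str]) -> List[str]:
--     """Extract tool names from scenario steps"""
--     tools = []
--     tool_keywords = {
--         "nmap": "nmap",
--         "sublist3r": "sublist3r",
--         "amass": "amass",
--         "nuclei": "nuclei",
--         "nikto": "nikto",
--         "testssl": "testssl",
--         "sqlmap": "sqlmap",
--         "whois": "whois",
--         "dig": "dig"
--     }
--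
--     for step in steps:
--         step_lower = step.lower()
--         for keyword, tool_name in tool_keywords.items():
--             if keyword in step_lower and tool_name not in tools:
--                 tools.append(tool_name)
--
--     return tools
-- ===== SOURCE B (Python) =====
-- from typing import List
--
--
-- KEYWORDS = ["nmap", "sublist3r", "amass", "nuclei", "nikto", "testssl", "sqlmap", "whois", "dig"]
--
--
-- def _insert_hit(hits, i, kw):
--     """Insert (i, kw) into hits (sorted by first-match index) before the first
--     entry with a larger index; equal indices keep keyword order."""
--     for pos, (j, _) in enumerate(hits):
--         if j > i:
--             return hits[:pos] + [(i, kw)] + hits[pos:]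
--     return hits + [(i, kw)]
--
--
-- def _extract_tools_from_steps(steps: List[str]) -> List[str]:
--     """Extract tool names from scenario steps"""
--     lows = [s.lower() for s in steps]
--     hits = []  # (first step index, tool), kept sorted by index, ties in keyword order
--     for kw in KEYWORDS:
--         idx = next((i for i, low in enumerate(lows) if kw in low), None)
--         if idx is not None:
--             hits = _insert_hit(hits, idx, kw)
--     return [kw for _, kw in hits]
-- ===== Notes on version B (the rewrite author's own statement) =====
-- stated objective: alternative
-- what changed: B scans keyword-major: for each keyword it finds the first matching step index once, then maintains the output by ordered insertion keyed on (first step index, keyword order), replacing A's step-major nested scan with an append-if-not-present membership test.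
import Mathlib
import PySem

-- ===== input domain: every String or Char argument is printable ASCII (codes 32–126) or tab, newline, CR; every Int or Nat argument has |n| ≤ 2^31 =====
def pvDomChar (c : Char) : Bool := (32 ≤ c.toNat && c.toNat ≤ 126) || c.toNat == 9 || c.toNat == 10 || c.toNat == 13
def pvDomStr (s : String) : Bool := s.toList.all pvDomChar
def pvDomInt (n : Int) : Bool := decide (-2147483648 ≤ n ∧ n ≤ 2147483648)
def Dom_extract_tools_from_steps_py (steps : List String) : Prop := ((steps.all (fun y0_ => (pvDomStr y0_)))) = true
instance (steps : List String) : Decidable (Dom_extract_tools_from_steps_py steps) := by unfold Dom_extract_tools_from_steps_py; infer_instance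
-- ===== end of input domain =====

-- B replaces A's step-major nested scan (append-if-not-present) by a keyword-major
-- pass with ordered insertion on (first step index, keyword order); alternative
-- decomposition, no speed claim.

-- ===== PORT A =====
def toolKeywordsA : List (String × String) :=
  [("nmap", "nmap"), ("sublist3r", "sublist3r"), ("amass", "amass"),
   ("nuclei", "nuclei"), ("nikto", "nikto"), ("testssl", "testssl"),
   ("sqlmap", "sqlmap"), ("whois", "whois"), ("dig", "dig")]

def extract_tools_from_steps_py (steps : List String) : List String :=
  steps.foldl (fun tools step =>
    let step_lower := PySem.Str.lower step
    toolKeywordsA.foldl (fun tools kv =>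
      if PySem.Str.isIn kv.1 step_lower && !(tools.contains kv.2) then tools ++ [kv.2]
      else tools) tools) []

-- ===== PORT B =====
def keywordsB : List String :=
  ["nmap", "sublist3r", "amass", "nuclei", "nikto", "testssl", "sqlmap", "whois", "dig"]

-- _insert_hit: insert (i, kw) before the first entry whose index exceeds i
def insertHit (i : Nat) (kw : String) : List (Nat × String) → List (Nat × String)
  | [] => [(i, kw)]
  | h :: t => if i < h.1 then (i, kw) :: h :: t else h :: insertHit i kw t

def extract_tools_from_steps_py_alt (steps : List String) : List String :=
  let lows := steps.map PySem.Str.lower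
  let hits := keywordsB.foldl (fun hits kw =>
    match lows.findIdx? (fun low => PySem.Str.isIn kw low) with
    | some i => insertHit i kw hits
    | none => hits) []
  hits.map Prod.snd

-- ===== PRECONDITION & SPEC =====
def Spec_extract_tools_from_steps_py (steps : List String) (out : List String) : Prop := out = extract_tools_from_steps_py_alt steps
instance (steps : List String) (out : List String) : Decidable (Spec_extract_tools_from_steps_py steps out) := by unfold Spec_extract_tools_from_steps_py; infer_instance

-- ===== CLAIM (what is proved, stated in full; the proofs are below) =====
def Claim_equal_extract_tools_from_steps_py : Prop := ∀ (steps : List String), Dom_extract_tools_from_steps_py steps → Spec_extract_tools_from_steps_py steps (extract_tools_from_steps_py steps)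

-- ===== LEMMAS AND PROOFS =====

lemma foldA_pairs (low : String) (kps : List (String × String)) (hfs : ∀ p ∈ kps, p.1 = p.2)
    (hnd : (kps.map Prod.snd).Nodup) : ∀ (tools : List String),
    kps.foldl (fun tools kv =>
      if PySem.Str.isIn kv.1 low && !(tools.contains kv.2) then tools ++ [kv.2]
      else tools) tools
    = tools ++ (kps.map Prod.snd).filter (fun t => PySem.Str.isIn t low && !(tools.contains t)) := by
  induction kps with
  | nil => simp
  | cons p rest ih =>
    intro tools
    obtain ⟨k, t⟩ := p
    have hkt : k = t := hfs (k, t) (by simp)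
    subst hkt
    have hnotin : k ∉ rest.map Prod.snd := (List.nodup_cons.mp (by simpa using hnd)).1
    have hnd' : (rest.map Prod.snd).Nodup := (List.nodup_cons.mp (by simpa using hnd)).2
    have hfs' : ∀ p ∈ rest, p.1 = p.2 := fun p hp => hfs p (List.mem_cons_of_mem _ hp)
    simp only [List.foldl_cons, List.map_cons, List.filter_cons]
    by_cases hc : (PySem.Str.isIn k low && !(tools.contains k)) = true
    · rw [if_pos hc, ih hfs' hnd' (tools ++ [k])]
      rw [List.filter_congr (q := fun t => PySem.Str.isIn t low && !(tools.contains t))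
        (by intro x hx
            have hxk : x ≠ k := fun h => hnotin (h ▸ hx)
            simp [hxk])]
      simp only [Bool.and_eq_true, Bool.not_eq_true', List.contains_eq_mem,
        decide_eq_false_iff_not] at hc
      simp
      exact ⟨by simpa using hc.1, hc.2⟩
    · rw [if_neg hc, ih hfs' hnd' tools]
      simp only [Bool.and_eq_true, Bool.not_eq_true', List.contains_eq_mem,
        decide_eq_false_iff_not, not_and, not_not] at hc
      simp
      intro h
      exact hc (by simpa using h)

def newKs (low : String) (seen : List String) : List String :=
  keywordsB.filter (fun t => PySem.Str.isIn t low && !(seen.contains t))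
def Aloop : List String → List String → List String
  | [], acc => acc
  | low :: rest, acc => Aloop rest (acc ++ newKs low acc)
def Dfun : List String → List String → List String
  | [], _ => []
  | low :: rest, seen => newKs low seen ++ Dfun rest (seen ++ newKs low seen)

lemma inner_eq_newKs (tools : List String) (low : String) :
    toolKeywordsA.foldl (fun tools kv =>
      if PySem.Str.isIn kv.1 low && !(tools.contains kv.2) then tools ++ [kv.2]
      else tools) tools = tools ++ newKs low tools := by
  rw [foldA_pairs low toolKeywordsA (by decide) (by decide)]
  rfl

lemma foldl_eq_Aloop (ls : List String) : ∀ acc,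
    ls.foldl (fun tools low => tools ++ newKs low tools) acc = Aloop ls acc := by
  induction ls with
  | nil => intro acc; simp [Aloop]
  | cons low rest ih => intro acc; simp only [List.foldl_cons, Aloop, ih]

lemma extractA_eq_Aloop (steps : List String) :
    extract_tools_from_steps_py steps = Aloop (steps.map PySem.Str.lower) [] := by
  unfold extract_tools_from_steps_py
  simp only [inner_eq_newKs]
  rw [← foldl_eq_Aloop, List.foldl_map]

lemma Aloop_eq_append (ls : List String) : ∀ acc, Aloop ls acc = acc ++ Dfun ls acc := by
  induction ls with
  | nil => intro acc; simp [Aloop, Dfun]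
  | cons low rest ih => intro acc; simp [Aloop, Dfun, ih, List.append_assoc]

lemma filter_or_perm {α : Type} (p q : α → Bool) (l : List α)
    (h : ∀ x ∈ l, ¬(p x = true ∧ q x = true)) :
    (l.filter p ++ l.filter q).Perm (l.filter (fun x => p x || q x)) := by
  induction l with
  | nil => simp
  | cons x t ih =>
    have ht := ih (fun y hy => h y (List.mem_cons_of_mem _ hy))
    by_cases hp : p x = true
    · have hq : q x = false := by
        rcases Bool.eq_false_or_eq_true (q x) with h' | h'
        · exact absurd ⟨hp, h'⟩ (h x (List.mem_cons_self))
        · exact h'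
      simp only [List.filter_cons, hp, hq, if_pos, Bool.true_or,
        Bool.false_eq_true, if_false, List.cons_append]
      exact ht.cons x
    · have hp' : p x = false := by simpa using hp
      by_cases hq : q x = true
      · simp only [List.filter_cons, hp', hq, Bool.false_eq_true, if_false, Bool.false_or, if_pos]
        exact (List.perm_middle).trans (ht.cons x)
      · have hq' : q x = false := by simpa using hq
        simp only [List.filter_cons, hp', hq', Bool.false_eq_true, if_false, Bool.false_or]
        exact ht

def firstIdx (lows : List String) (t : String) : Option Nat :=
  lows.findIdx? (fun low => PySem.Str.isIn t low)
def rankK (t : String) : Nat := keywordsB.findIdx (· = t)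
def okey (lows : List String) (t : String) : Nat × Nat := ((firstIdx lows t).getD 0, rankK t)
def oLT (lows : List String) (a b : String) : Prop :=
  (okey lows a).1 < (okey lows b).1 ∨
  ((okey lows a).1 = (okey lows b).1 ∧ (okey lows a).2 < (okey lows b).2)
def matchedK (lows : List String) : List String :=
  keywordsB.filter (fun t => (firstIdx lows t).isSome)

lemma firstIdx_cons (low : String) (rest : List String) (t : String) :
    firstIdx (low :: rest) t =
      if PySem.Str.isIn t low = true then some 0
      else (firstIdx rest t).map (fun i => i + 1) := by
  simp [firstIdx, List.findIdx?_cons]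

lemma rank_pairwise : keywordsB.Pairwise (fun a b => rankK a < rankK b) := by decide

lemma Dfun_char (ls : List String) : ∀ seen : List String,
    (Dfun ls seen).Perm
      (keywordsB.filter (fun t => !(seen.contains t) && (firstIdx ls t).isSome))
    ∧ (Dfun ls seen).Pairwise (oLT ls) := by
  induction ls with
  | nil =>
    intro seen
    constructor
    · simp [Dfun, firstIdx]
    · simp [Dfun]
  | cons low rest ih =>
    intro seen
    obtain ⟨ihp, ihw⟩ := ih (seen ++ newKs low seen)
    have hmemnew : ∀ t : String, t ∈ newKs low seen ↔
        (t ∈ keywordsB ∧ PySem.Str.isIn t low = true ∧ seen.contains t = false) := by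
      intro t
      simp [newKs]
    have hmemtail : ∀ a ∈ Dfun rest (seen ++ newKs low seen),
        a ∈ keywordsB ∧ seen.contains a = false ∧ PySem.Str.isIn a low = false
          ∧ (firstIdx rest a).isSome := by
      intro a ha
      have := (ihp.mem_iff).mp ha
      rw [List.mem_filter] at this
      obtain ⟨hk, hcond⟩ := this
      have h1 : ((seen ++ newKs low seen).contains a) = false ∧ (firstIdx rest a).isSome := by
        simpa [Bool.not_eq_true'] using hcond
      have h2 : seen.contains a = false ∧ (newKs low seen).contains a = false := by
        have := h1.1
        simp only [List.contains_append, Bool.or_eq_false_iff] at this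
        exact this
      refine ⟨hk, h2.1, ?_, h1.2⟩
      rcases Bool.eq_false_or_eq_true (PySem.Str.isIn a low) with h' | h'
      · exfalso
        have : a ∈ newKs low seen := (hmemnew a).mpr ⟨hk, h', h2.1⟩
        rw [← List.contains_iff_mem, h2.2] at this
        exact Bool.false_ne_true this
      · exact h'
    constructor
    · -- permutation
      show (newKs low seen ++ Dfun rest (seen ++ newKs low seen)).Perm _
      have step3 : (newKs low seen ++ Dfun rest (seen ++ newKs low seen)).Perm
          (keywordsB.filter (fun t => PySem.Str.isIn t low && !(seen.contains t)) ++
           keywordsB.filter (fun t => !((seen ++ newKs low seen).contains t) && (firstIdx rest t).isSome)) :=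
        List.Perm.append (by simp [newKs]) ihp
      refine step3.trans ?_
      refine (filter_or_perm _ _ _ ?_).trans (List.Perm.of_eq (List.filter_congr ?_))
      · intro t ht ⟨hp, hq⟩
        simp only [Bool.and_eq_true, Bool.not_eq_true'] at hp hq
        have hmem : t ∈ newKs low seen := (hmemnew t).mpr ⟨ht, hp.1, hp.2⟩
        have hc : (newKs low seen).contains t = false := by
          have := hq.1
          simp only [List.contains_append, Bool.or_eq_false_iff] at this
          exact this.2
        rw [← List.contains_iff_mem, hc] at hmem
        exact Bool.false_ne_true hmem
      · intro t ht
        by_cases hin : PySem.Str.isIn t low = true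
        · have hin' := hin
          rw [PySem.Str.isIn_eq] at hin'
          by_cases hs : t ∈ seen
          · simp [hin', hs, firstIdx_cons]
          · simp [hin', hs, firstIdx_cons]
        · have hin0 : PySem.Str.isIn t low = false := by simpa using hin
          have hin' := hin0
          rw [PySem.Str.isIn_eq] at hin'
          have hnm : t ∉ newKs low seen := fun hmem => by
            have := (hmemnew t).mp hmem
            rw [hin0] at this
            exact Bool.false_ne_true this.2.1
          simp [hin', hnm, firstIdx_cons]
    · -- pairwise
      show (newKs low seen ++ Dfun rest (seen ++ newKs low seen)).Pairwise (oLT (low :: rest))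
      rw [List.pairwise_append]
      refine ⟨?_, ?_, ?_⟩
      · have hsub : (newKs low seen).Pairwise (fun a b => rankK a < rankK b) :=
          List.Pairwise.sublist List.filter_sublist rank_pairwise
        refine hsub.imp_of_mem ?_
        intro a b ha hb hr
        have hia := ((hmemnew a).mp ha).2.1
        have hib := ((hmemnew b).mp hb).2.1
        have hia' := hia
        have hib' := hib
        rw [PySem.Str.isIn_eq] at hia' hib'
        right
        constructor
        · simp [okey, firstIdx_cons, hia', hib']
        · exact hr
      · refine ihw.imp_of_mem ?_
        intro a b ha hb hr
        obtain ⟨_, _, hina, hfa⟩ := hmemtail a ha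
        obtain ⟨_, _, hinb, hfb⟩ := hmemtail b hb
        obtain ⟨ia, hia⟩ := Option.isSome_iff_exists.mp hfa
        obtain ⟨ib, hib⟩ := Option.isSome_iff_exists.mp hfb
        have hina' := hina
        have hinb' := hinb
        rw [PySem.Str.isIn_eq] at hina' hinb'
        simp only [oLT, okey, firstIdx_cons, hina, hinb, hia, hib] at hr ⊢
        simp only [Bool.false_eq_true, if_false, Option.map_some, Option.getD_some] at hr ⊢
        omega
      · intro a ha b hb
        have hina := ((hmemnew a).mp ha).2.1
        obtain ⟨_, _, hinb, hfb⟩ := hmemtail b hb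
        obtain ⟨ib, hib⟩ := Option.isSome_iff_exists.mp hfb
        have hina' := hina
        have hinb' := hinb
        rw [PySem.Str.isIn_eq] at hina' hinb'
        left
        simp [okey, firstIdx_cons, hina', hinb', hib]

def hLT (a b : Nat × String) : Prop :=
  a.1 < b.1 ∨ (a.1 = b.1 ∧ rankK a.2 < rankK b.2)

lemma insertHit_props (i : Nat) (kw : String) : ∀ (hits : List (Nat × String)),
    hits.Pairwise hLT → (∀ x ∈ hits, rankK x.2 < rankK kw) →
    (insertHit i kw hits).Perm ((i, kw) :: hits) ∧ (insertHit i kw hits).Pairwise hLT := by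
  intro hits
  induction hits with
  | nil =>
    intro _ _
    exact ⟨List.Perm.refl _, by simp [insertHit]⟩
  | cons h t ih =>
    intro hp hr
    obtain ⟨hph, hpt⟩ := List.pairwise_cons.mp hp
    by_cases hlt : i < h.1
    · rw [insertHit, if_pos hlt]
      refine ⟨List.Perm.refl _, ?_⟩
      rw [List.pairwise_cons]
      refine ⟨?_, hp⟩
      intro y hy
      left
      rcases List.mem_cons.mp hy with rfl | hy'
      · exact hlt
      · have := hph y hy'
        rcases this with h1 | ⟨h1, _⟩ <;> omega
    · have hle : h.1 ≤ i := Nat.le_of_not_lt hlt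
      rw [insertHit, if_neg hlt]
      obtain ⟨ihperm, ihpw⟩ := ih hpt (fun x hx => hr x (List.mem_cons_of_mem _ hx))
      refine ⟨(ihperm.cons h).trans (List.Perm.swap _ _ _), ?_⟩
      rw [List.pairwise_cons]
      refine ⟨?_, ihpw⟩
      intro y hy
      rcases List.mem_cons.mp (ihperm.mem_iff.mp hy) with rfl | hy'
      · rcases Nat.lt_or_ge h.1 i with h1 | h1
        · left; exact h1
        · right
          exact ⟨Nat.le_antisymm hle h1, hr h List.mem_cons_self⟩
      · exact hph y hy'

lemma B_fold (lows : List String) : ∀ (kws : List String) (hits : List (Nat × String)),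
    kws.Pairwise (fun a b => rankK a < rankK b) →
    hits.Pairwise hLT →
    (∀ x ∈ hits, firstIdx lows x.2 = some x.1) →
    (∀ x ∈ hits, ∀ k ∈ kws, rankK x.2 < rankK k) →
    (kws.foldl (fun hits kw => match firstIdx lows kw with
        | some i => insertHit i kw hits | none => hits) hits).Perm
      (hits ++ kws.filterMap (fun kw => (firstIdx lows kw).map (fun i => (i, kw))))
    ∧ (kws.foldl (fun hits kw => match firstIdx lows kw with
        | some i => insertHit i kw hits | none => hits) hits).Pairwise hLT
    ∧ (∀ x ∈ kws.foldl (fun hits kw => match firstIdx lows kw with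
        | some i => insertHit i kw hits | none => hits) hits, firstIdx lows x.2 = some x.1) := by
  intro kws
  induction kws with
  | nil =>
    intro hits _ hpw hfi _
    exact ⟨by simp, hpw, hfi⟩
  | cons kw rest ih =>
    intro hits hkp hpw hfi hrk
    obtain ⟨hkph, hkpt⟩ := List.pairwise_cons.mp hkp
    simp only [List.foldl_cons]
    rcases hcase : firstIdx lows kw with _ | i
    · simp only []
      obtain ⟨p1, p2, p3⟩ := ih hits hkpt hpw hfi
        (fun x hx k hk => hrk x hx k (List.mem_cons_of_mem _ hk))
      refine ⟨?_, p2, p3⟩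
      simpa [List.filterMap_cons, hcase] using p1
    · simp only []
      obtain ⟨iperm, ipw⟩ := insertHit_props i kw hits hpw
        (fun x hx => hrk x hx kw List.mem_cons_self)
      have hfi' : ∀ x ∈ insertHit i kw hits, firstIdx lows x.2 = some x.1 := by
        intro x hx
        rcases List.mem_cons.mp (iperm.mem_iff.mp hx) with rfl | hx'
        · exact hcase
        · exact hfi x hx'
      have hrk' : ∀ x ∈ insertHit i kw hits, ∀ k ∈ rest, rankK x.2 < rankK k := by
        intro x hx k hk
        rcases List.mem_cons.mp (iperm.mem_iff.mp hx) with rfl | hx'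
        · exact hkph k hk
        · exact hrk x hx' k (List.mem_cons_of_mem _ hk)
      obtain ⟨p1, p2, p3⟩ := ih (insertHit i kw hits) hkpt ipw hfi' hrk'
      refine ⟨?_, p2, p3⟩
      refine p1.trans ?_
      rw [List.filterMap_cons]
      simp only [hcase, Option.map_some]
      exact (iperm.append_right _).trans List.perm_middle.symm

lemma map_snd_filterMap (g : String → Option Nat) (l : List String) :
    (l.filterMap (fun kw => (g kw).map (fun i => (i, kw)))).map Prod.snd
      = l.filter (fun kw => (g kw).isSome) := by
  induction l with
  | nil => rfl
  | cons x t ih =>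
    rcases h : g x with _ | i <;> simp [h, ih]

lemma B_char (steps : List String) :
    (extract_tools_from_steps_py_alt steps).Perm (matchedK (steps.map PySem.Str.lower))
    ∧ (extract_tools_from_steps_py_alt steps).Pairwise (oLT (steps.map PySem.Str.lower)) := by
  obtain ⟨p1, p2, p3⟩ := B_fold (steps.map PySem.Str.lower) keywordsB []
    rank_pairwise (by simp) (by simp) (by simp)
  have hB : extract_tools_from_steps_py_alt steps
      = (keywordsB.foldl (fun hits kw => match firstIdx (steps.map PySem.Str.lower) kw with
          | some i => insertHit i kw hits | none => hits) []).map Prod.snd := rfl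
  rw [hB]
  constructor
  · have := p1.map Prod.snd
    simpa [map_snd_filterMap, matchedK] using this
  · rw [List.pairwise_map]
    refine p2.imp_of_mem ?_
    intro a b ha hb hr
    have hfa := p3 a ha
    have hfb := p3 b hb
    rcases hr with h1 | ⟨h1, h2⟩
    · left
      simpa [okey, hfa, hfb] using h1
    · exact Or.inr ⟨by simpa [okey, hfa, hfb] using h1, h2⟩

-- ===== VERDICT (by name: the statement is the Claim_ definition above) =====
theorem extract_tools_from_steps_py_spec : Claim_equal_extract_tools_from_steps_py := by
  intro steps _
  unfold Spec_extract_tools_from_steps_py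
  have hA : extract_tools_from_steps_py steps = Dfun (steps.map PySem.Str.lower) [] := by
    rw [extractA_eq_Aloop, Aloop_eq_append]
    simp
  obtain ⟨hap, haw⟩ := Dfun_char (steps.map PySem.Str.lower) []
  have hap' : (Dfun (steps.map PySem.Str.lower) []).Perm (matchedK (steps.map PySem.Str.lower)) := by
    refine hap.trans (List.Perm.of_eq ?_)
    simp [matchedK]
  obtain ⟨hbp, hbw⟩ := B_char steps
  have hperm : (extract_tools_from_steps_py steps).Perm (extract_tools_from_steps_py_alt steps) := by
    rw [hA]
    exact hap'.trans hbp.symm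
  exact hperm.eq_of_pairwise (fun a b _ _ h1 h2 => by
      rcases h1 with h1 | ⟨h1a, h1b⟩ <;> rcases h2 with h2 | ⟨h2a, h2b⟩ <;> omega)
    (hA ▸ haw) hbw
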